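-- pv_equiv track=rewrite | github.com/mlinegar/ThinkingTrees | experiments/manifesto_rile/generate_oracle_ground_truth.py | build_tree_levels
-- ===== SOURCE A (Python) =====
-- def build_tree_levels(chunks: list[str]) -> list[list[str]]:
--     """
--     Build hierarchical merge levels from chunks.
--
--     Args:
--         chunks: List of text chunks (level 0)
--
--     Returns:
--         List of levels, where levels[i] contains text for level i nodes
--     """
--     levels = [chunks]  # Level 0 = leaves
--
--     current_level = chunks
--     while len(current_level) > 1:
--         next_level = []
--
--         # Pair adjacent nodes and merge
--         for i in range(0, len(current_level), 2):
--             if i + 1 < len(current_level):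
--                 # Merge two nodes
--                 merged = f"{current_level[i]}\n\n{current_level[i+1]}"
--             else:
--                 # Odd one out - promote as-is
--                 merged = current_level[i]
--             next_level.append(merged)
--
--         levels.append(next_level)
--         current_level = next_level
--
--     return levels
-- ===== SOURCE B (Python) =====
-- def build_tree_levels(chunks: list[str]) -> list[list[str]]:
--     """Recursive decomposition over levels; pairing via strided slices + zip."""
--     if len(chunks) <= 1:
--         return [chunks]
--     nxt = [a + "\n\n" + b for a, b in zip(chunks[::2], chunks[1::2])]
--     if len(chunks) % 2 == 1:
--         nxt.append(chunks[-1])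
--     return [chunks] + build_tree_levels(nxt)
-- ===== Notes on version B (the rewrite author's own statement) =====
-- stated objective: simpler
-- what changed: Replaced the while loop with its mutable levels accumulator and index-stepping inner for-loop by direct recursion over the level reduction, pairing adjacent chunks via strided slices zipped together plus the promoted odd tail.
import Mathlib
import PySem

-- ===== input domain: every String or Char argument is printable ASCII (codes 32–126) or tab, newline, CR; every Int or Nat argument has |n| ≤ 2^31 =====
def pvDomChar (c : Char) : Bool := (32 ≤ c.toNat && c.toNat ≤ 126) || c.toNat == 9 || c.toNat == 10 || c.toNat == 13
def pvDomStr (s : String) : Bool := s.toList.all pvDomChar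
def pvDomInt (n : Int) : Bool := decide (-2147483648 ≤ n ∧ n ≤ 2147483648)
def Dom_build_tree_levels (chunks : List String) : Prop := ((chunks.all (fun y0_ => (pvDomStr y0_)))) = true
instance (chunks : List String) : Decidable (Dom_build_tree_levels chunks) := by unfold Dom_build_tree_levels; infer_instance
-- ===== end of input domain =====

-- B replaces A's while loop and index-stepping inner for-loop by direct recursion on the
-- shrinking level, pairing via strided slices + zip (objective: simpler; same cost).

-- ===== PORT A =====
-- inner loop 'for i in range(0, len(current_level), 2): next_level.append(…)' as the obvious
-- index recursion stepping by 2 (indices are in range, so List.getD is exact here)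
def pairLoopA (cur : List String) (i : Nat) : List String :=
  if h : i < cur.length then
    (if i + 1 < cur.length then cur.getD i "" ++ "\n\n" ++ cur.getD (i + 1) "" else cur.getD i "")
      :: pairLoopA cur (i + 2)
  else []
termination_by cur.length - i

-- the while loop; fuel = current length bounds the number of iterations (each level shrinks)
def whileA : Nat → List String → List (List String)
  | 0, _ => []
  | fuel + 1, cur =>
    if 1 < cur.length then
      let nl := pairLoopA cur 0
      nl :: whileA fuel nl
    else []

def build_tree_levels (chunks : List String) : List (List String) :=
  chunks :: whileA chunks.length chunks

-- ===== PORT B =====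
-- hand port of the stride-2 slice xs[::2] (every second element from index 0); exact
def stride2 : List String → List String
  | [] => []
  | [a] => [a]
  | a :: _ :: rest => a :: stride2 rest

theorem stride2_length : ∀ l : List String, (stride2 l).length = (l.length + 1) / 2
  | [] => rfl
  | [_] => by simp [stride2]
  | _ :: _ :: rest => by
    simp only [stride2, List.length_cons, stride2_length rest]
    omega

def build_tree_levels_alt (chunks : List String) : List (List String) :=
  if _h : chunks.length ≤ 1 then [chunks]
  else
    let nxt := (List.zipWith (fun a b => a ++ "\n\n" ++ b) (stride2 chunks) (stride2 (chunks.drop 1)))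
      ++ (if chunks.length % 2 = 1 then [PySem.List.pyGetD chunks (-1) ""] else [])
    chunks :: build_tree_levels_alt nxt
termination_by chunks.length
decreasing_by
  simp only [List.length_append, List.length_zipWith, stride2_length, List.length_drop]
  split <;> simp <;> omega

-- ===== PRECONDITION & SPEC =====
def Spec_build_tree_levels (chunks : List String) (out : List (List String)) : Prop := out = build_tree_levels_alt chunks
instance (chunks : List String) (out : List (List String)) : Decidable (Spec_build_tree_levels chunks out) := by unfold Spec_build_tree_levels; infer_instance

-- ===== CLAIM (what is proved, stated in full; the proofs are below) =====
def Claim_equal_build_tree_levels : Prop := ∀ (chunks : List String), Dom_build_tree_levels chunks → Spec_build_tree_levels chunks (build_tree_levels chunks)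

-- ===== LEMMAS AND PROOFS =====

-- length of B's next level
theorem nxt_length (chunks : List String) :
    ((List.zipWith (fun a b => a ++ "\n\n" ++ b) (stride2 chunks) (stride2 (chunks.drop 1)))
      ++ (if chunks.length % 2 = 1 then [PySem.List.pyGetD chunks (-1) ""] else [])).length
    = (chunks.length + 1) / 2 := by
  rcases chunks with _ | ⟨a, rest⟩
  · rfl
  · simp only [List.length_append, List.length_zipWith, stride2_length, List.drop_one,
      List.tail_cons, List.length_cons]
    split <;> rename_i h <;> simp <;> omega


-- ghost middle form: both pairing mechanisms equal this structural two-step pairing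
def mergePairsM : List String → List String
  | [] => []
  | [a] => [a]
  | a :: b :: rest => (a ++ "\n\n" ++ b) :: mergePairsM rest

theorem pairLoopA_eq (cur : List String) (i : Nat) :
    pairLoopA cur i = mergePairsM (cur.drop i) := by
  rw [pairLoopA]
  by_cases h : i < cur.length
  · rw [dif_pos h]
    rw [pairLoopA_eq cur (i + 2)]
    have hdrop : cur.drop i = cur[i] :: cur.drop (i + 1) := List.drop_eq_getElem_cons h
    by_cases h2 : i + 1 < cur.length
    · have hdrop2 : cur.drop (i + 1) = cur[i + 1] :: cur.drop (i + 2) :=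
        List.drop_eq_getElem_cons h2
      rw [hdrop, hdrop2]
      simp [mergePairsM, if_pos h2, List.getElem?_eq_getElem h, List.getElem?_eq_getElem h2]
    · have hdrop2 : cur.drop (i + 1) = [] := List.drop_eq_nil_of_le (by omega)
      have hdrop3 : cur.drop (i + 2) = [] := List.drop_eq_nil_of_le (by omega)
      rw [hdrop, hdrop2, hdrop3]
      simp [mergePairsM, if_neg h2, List.getElem?_eq_getElem h]
  · rw [dif_neg h]
    rw [List.drop_eq_nil_of_le (by omega)]
    rfl
termination_by cur.length - i

theorem pairB_eq : ∀ l : List String,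
    (List.zipWith (fun a b => a ++ "\n\n" ++ b) (stride2 l) (stride2 (l.drop 1)))
      ++ (if l.length % 2 = 1 then [PySem.List.pyGetD l (-1) ""] else [])
    = mergePairsM l
  | [] => rfl
  | [a] => by simp [stride2, mergePairsM, PySem.List.pyGetD, PySem.List.pyGet?_neg_one]
  | [a, b] => by simp [stride2, mergePairsM]
  | a :: b :: c :: rest' => by
    have ih := pairB_eq (c :: rest')
    simp only [stride2, List.drop_one, List.tail_cons, List.zipWith_cons_cons,
      List.cons_append, mergePairsM] at ih ⊢
    congr 1
    rw [← ih]
    congr 1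
    have hg : PySem.List.pyGetD (a :: b :: c :: rest') (-1) ""
        = PySem.List.pyGetD (c :: rest') (-1) "" := by
      simp [PySem.List.pyGetD, PySem.List.pyGet?_neg_one]
    rw [hg]
    by_cases hpar : (c :: rest').length % 2 = 1
    · rw [if_pos hpar, if_pos (by simp at hpar ⊢; omega)]
    · rw [if_neg hpar, if_neg (by simp at hpar ⊢; omega)]

theorem whileA_eq (fuel : Nat) (cur : List String) (hf : cur.length ≤ fuel) :
    cur :: whileA fuel cur = build_tree_levels_alt cur := by
  induction fuel generalizing cur with
  | zero =>
    have : cur = [] := List.eq_nil_of_length_eq_zero (by omega)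
    subst this
    rw [whileA, build_tree_levels_alt.eq_def]
    rfl
  | succ f ih =>
    rw [whileA, build_tree_levels_alt.eq_def]
    by_cases h1 : 1 < cur.length
    · rw [if_pos h1, dif_neg (by omega)]
      have hm := nxt_length cur
      have hrec := ih _ (show (_ : List String).length ≤ f by rw [hm]; omega)
      rw [pairLoopA_eq cur 0, List.drop_zero, ← pairB_eq cur, hrec]
    · rw [if_neg h1, dif_pos (by omega : cur.length ≤ 1)]

theorem build_tree_levels_spec_aux (chunks : List String) :
    build_tree_levels chunks = build_tree_levels_alt chunks := by
  rw [build_tree_levels]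
  exact whileA_eq chunks.length chunks le_rfl

-- ===== VERDICT (by name: the statement is the Claim_ definition above) =====
theorem build_tree_levels_spec : Claim_equal_build_tree_levels := by
  intro chunks _
  exact build_tree_levels_spec_aux chunks
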